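-- pv_equiv track=rewrite | github.com/HerosNeverDieGuiSun/Layout-of-Anhui-village | LayoutByBN/layout.py | get_s_e
-- ===== SOURCE A (Python) =====
-- def get_s_e(length, index):
--     if index == 0:
--         start = 0
--         end = length - 2
--     else:
--         start = 0
--         end = 0
--         i = 1
--         while (i <= index):
--             start = start + length - i
--             i = i + 1
--         start = start
--         j = 1
--         while (j <= index + 1):
--             end = end + length - j
--             j = j + 1
--         end = end - 1
--     return start, end
-- ===== SOURCE B (Python) =====
-- def get_s_e(length, index):
--     # closed form: start = sum_{i=1..index}(length-i), end = sum_{j=1..index+1}(length-j) - 1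
--     # (empty sums when the upper bound is < 1, hence the clamps)
--     m = max(index, 0)
--     n = max(index + 1, 0)
--     start = m * length - m * (m + 1) // 2
--     end = n * length - n * (n + 1) // 2 - 1
--     return start, end
-- ===== Notes on version B (the rewrite author's own statement) =====
-- stated objective: faster
-- what changed: Replaced the two O(index) accumulation loops by the arithmetic-series closed form (clamped at 0 for empty sums).
import Mathlib
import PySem

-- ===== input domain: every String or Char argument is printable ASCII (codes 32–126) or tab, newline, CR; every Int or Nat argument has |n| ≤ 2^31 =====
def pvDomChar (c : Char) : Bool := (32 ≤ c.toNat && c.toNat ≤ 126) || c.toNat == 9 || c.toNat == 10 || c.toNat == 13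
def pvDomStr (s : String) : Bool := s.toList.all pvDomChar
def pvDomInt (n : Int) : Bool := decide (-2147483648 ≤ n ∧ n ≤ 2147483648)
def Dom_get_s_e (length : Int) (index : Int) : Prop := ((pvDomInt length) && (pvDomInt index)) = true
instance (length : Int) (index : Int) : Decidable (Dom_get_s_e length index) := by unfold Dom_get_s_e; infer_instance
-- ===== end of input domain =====

-- B replaces A's two O(index) accumulation loops by the arithmetic-series closed form.
-- ===== PORT A =====
-- 'while (i <= bound): acc = acc + length - i; i = i + 1'
def pvLoop (length bound i acc : Int) : Int :=
  if i ≤ bound then pvLoop length bound (i + 1) (acc + length - i) else acc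
termination_by (bound + 1 - i).toNat
decreasing_by omega

def get_s_e (length : Int) (index : Int) : List Int :=
  if index = 0 then
    [0, length - 2]
  else
    let start := pvLoop length index 1 0
    let «end» := pvLoop length (index + 1) 1 0 - 1
    [start, «end»]

-- ===== PORT B =====
def get_s_e_alt (length : Int) (index : Int) : List Int :=
  let m := max index 0
  let n := max (index + 1) 0
  let start := m * length - PySem.Int.floordiv (m * (m + 1)) 2
  let «end» := n * length - PySem.Int.floordiv (n * (n + 1)) 2 - 1
  [start, «end»]

-- ===== PRECONDITION & SPEC =====
def Spec_get_s_e (length : Int) (index : Int) (out : List Int) : Prop := out = get_s_e_alt length index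
instance (length : Int) (index : Int) (out : List Int) : Decidable (Spec_get_s_e length index out) := by unfold Spec_get_s_e; infer_instance

-- ===== CLAIM (what is proved, stated in full; the proofs are below) =====
def Claim_equal_get_s_e : Prop := ∀ (length : Int) (index : Int), Dom_get_s_e length index → Spec_get_s_e length index (get_s_e length index)

-- ===== LEMMAS AND PROOFS =====
-- invariant of A's loop, doubled to avoid division
theorem pvLoop_double (length : Int) (bound : Int) :
    ∀ (n : Nat) (i acc : Int), bound + 1 - i = n →
      2 * pvLoop length bound i acc = 2 * acc + (n : Int) * (2 * length - 2 * i - ((n : Int) - 1)) := by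
  intro n
  induction n with
  | zero =>
      intro i acc h
      rw [pvLoop]
      simp only [Nat.cast_zero]
      rw [if_neg (by omega)]
      ring
  | succ k ih =>
      intro i acc h
      rw [pvLoop, if_pos (by omega)]
      rw [ih (i + 1) (acc + length - i) (by omega)]
      push_cast
      ring

-- closed value of A's loop started at i = 1, acc = 0
theorem pvLoop_closed (length bound : Int) :
    2 * pvLoop length bound 1 0 = 2 * (max bound 0) * length - (max bound 0) * ((max bound 0) + 1) := by
  by_cases hb : 0 ≤ bound
  · rw [pvLoop_double length bound bound.toNat 1 0 (by omega)]
    have h : (bound.toNat : Int) = max bound 0 := by omega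
    rw [h]; ring
  · rw [pvLoop, if_neg (by omega)]
    have h : max bound 0 = 0 := by omega
    rw [h]; ring

theorem floordiv_even_mul (m : Int) :
    2 * PySem.Int.floordiv (m * (m + 1)) 2 = m * (m + 1) := by
  rw [PySem.Int.floordiv_eq_ediv_of_pos (by omega)]
  rcases Int.even_mul_succ_self m with ⟨k, hk⟩
  omega

theorem closed_eq (length bound : Int) :
    pvLoop length bound 1 0 =
      (max bound 0) * length - PySem.Int.floordiv ((max bound 0) * ((max bound 0) + 1)) 2 := by
  have h1 := pvLoop_closed length bound
  have h2 := floordiv_even_mul (max bound 0)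
  nlinarith [h1, h2]

-- ===== VERDICT (by name: the statement is the Claim_ definition above) =====
theorem get_s_e_spec : Claim_equal_get_s_e := by
  intro length index _
  unfold Spec_get_s_e get_s_e get_s_e_alt
  split_ifs with h
  · subst h
    simp only [max_self, zero_add]
    norm_num [PySem.Int.floordiv_eq_ediv_of_pos]
    ring
  · rw [closed_eq length index, closed_eq length (index + 1)]
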